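-- pv_equiv track=rewrite | github.com/northpoleforce/light-map-navigation | src/delivery_benchmark/get_house_number_position.py | replace_model_names
-- ===== SOURCE A (Python) =====
-- def replace_model_names(models):
--     replaced_models = []
--     for model_name, _ in models:
--         if 'text_model1' in model_name:
--             replaced_models.append('unit1')
--         elif 'text_model2' in model_name:
--             replaced_models.append('unit2')
--         elif 'text_model3' in model_name:
--             replaced_models.append('unit3')
--         else:
--             replaced_models.append(model_name)
--     return replaced_models
-- ===== SOURCE B (Python) =====
-- def replace_model_names(models):
--     # Pattern-major staged rewriting: one full pass over the list per pattern,
--     # carrying (name, done) cells so earlier passes shadow later ones.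
--     cells = [(name, False) for name, _ in models]
--     for d in (1, 2, 3):
--         sub = 'text_model' + str(d)
--         cells = [('unit' + str(d), True) if not done and sub in name else (name, done)
--                  for name, done in cells]
--     return [name for name, _ in cells]
-- ===== Notes on version B (the rewrite author's own statement) =====
-- stated objective: alternative
-- what changed: Inverts the loop nesting: instead of A's item-major single pass with an if/elif chain, B makes one staged pass over the whole list per pattern (pattern-major), rewriting undone (name, done) cells; earlier passes mark cells done so later patterns cannot override, which reproduces A's first-match-wins order.
import Mathlib
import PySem

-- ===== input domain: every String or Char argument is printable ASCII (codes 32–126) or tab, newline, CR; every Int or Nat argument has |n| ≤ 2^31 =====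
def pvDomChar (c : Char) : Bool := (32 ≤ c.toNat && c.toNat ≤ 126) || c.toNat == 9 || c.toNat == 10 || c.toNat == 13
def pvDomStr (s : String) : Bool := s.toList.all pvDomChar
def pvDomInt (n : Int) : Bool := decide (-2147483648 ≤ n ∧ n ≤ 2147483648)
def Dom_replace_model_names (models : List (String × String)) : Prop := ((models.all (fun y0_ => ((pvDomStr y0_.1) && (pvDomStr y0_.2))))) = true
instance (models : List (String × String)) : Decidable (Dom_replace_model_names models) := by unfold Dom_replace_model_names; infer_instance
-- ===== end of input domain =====

-- B inverts the loop nesting: one staged pass over the whole list per pattern (pattern-major),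
-- with done-marks so earlier passes shadow later ones; same result as A's item-major if/elif pass.
-- ===== PORT A =====
def replace_model_names (models : List (String × String)) : List String :=
  models.foldl (fun replaced_models p =>
    let model_name := p.1
    if PySem.Str.isIn "text_model1" model_name then replaced_models ++ ["unit1"]
    else if PySem.Str.isIn "text_model2" model_name then replaced_models ++ ["unit2"]
    else if PySem.Str.isIn "text_model3" model_name then replaced_models ++ ["unit3"]
    else replaced_models ++ [model_name]) []

-- ===== PORT B =====
-- one staged pass of Source B's inner comprehension, for pattern number d
def rmn_pass (d : Int) (cells : List (String × Bool)) : List (String × Bool) :=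
  cells.map (fun c =>
    if !c.2 && PySem.Str.isIn ("text_model" ++ PySem.Int.toStr d) c.1
    then ("unit" ++ PySem.Int.toStr d, true) else c)

def replace_model_names_alt (models : List (String × String)) : List String :=
  (([1, 2, 3] : List Int).foldl (fun cells d => rmn_pass d cells)
    (models.map (fun p => (p.1, false)))).map Prod.fst

-- ===== PRECONDITION & SPEC =====
def Spec_replace_model_names (models : List (String × String)) (out : List String) : Prop := out = replace_model_names_alt models
instance (models : List (String × String)) (out : List String) : Decidable (Spec_replace_model_names models out) := by unfold Spec_replace_model_names; infer_instance

-- ===== CLAIM (what is proved, stated in full; the proofs are below) =====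
def Claim_equal_replace_model_names : Prop := ∀ (models : List (String × String)), Dom_replace_model_names models → Spec_replace_model_names models (replace_model_names models)

-- ===== LEMMAS AND PROOFS =====

lemma rmn_A_step (acc : List String) (l : List (String × String)) :
    l.foldl (fun replaced_models p =>
      let model_name := p.1
      if PySem.Str.isIn "text_model1" model_name then replaced_models ++ ["unit1"]
      else if PySem.Str.isIn "text_model2" model_name then replaced_models ++ ["unit2"]
      else if PySem.Str.isIn "text_model3" model_name then replaced_models ++ ["unit3"]
      else replaced_models ++ [model_name]) acc
      = acc ++ l.map (fun p =>
          if PySem.Str.isIn "text_model1" p.1 then "unit1"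
          else if PySem.Str.isIn "text_model2" p.1 then "unit2"
          else if PySem.Str.isIn "text_model3" p.1 then "unit3"
          else p.1) := by
  induction l generalizing acc with
  | nil => simp
  | cons h t ih =>
    simp only [List.foldl_cons, List.map_cons, ih]
    cases h1 : PySem.Str.isIn "text_model1" h.1 <;>
      cases h2 : PySem.Str.isIn "text_model2" h.1 <;>
        cases h3 : PySem.Str.isIn "text_model3" h.1 <;>
          simp only [h1, h2, h3, Bool.false_eq_true, if_true, if_false,
            List.append_assoc, List.singleton_append]

lemma rmn_sub1 : ("text_model" ++ PySem.Int.toStr 1) = "text_model1" := by decide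
lemma rmn_sub2 : ("text_model" ++ PySem.Int.toStr 2) = "text_model2" := by decide
lemma rmn_sub3 : ("text_model" ++ PySem.Int.toStr 3) = "text_model3" := by decide
lemma rmn_unit1 : ("unit" ++ PySem.Int.toStr 1) = "unit1" := by decide
lemma rmn_unit2 : ("unit" ++ PySem.Int.toStr 2) = "unit2" := by decide
lemma rmn_unit3 : ("unit" ++ PySem.Int.toStr 3) = "unit3" := by decide

lemma rmn_B_eval (models : List (String × String)) :
    replace_model_names_alt models = models.map (fun p =>
      if PySem.Str.isIn "text_model1" p.1 then "unit1"
      else if PySem.Str.isIn "text_model2" p.1 then "unit2"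
      else if PySem.Str.isIn "text_model3" p.1 then "unit3"
      else p.1) := by
  unfold replace_model_names_alt
  simp only [List.foldl_cons, List.foldl_nil, rmn_pass, List.map_map]
  refine List.map_congr_left ?_
  intro p _
  simp only [Function.comp, rmn_sub1, rmn_sub2, rmn_sub3, rmn_unit1, rmn_unit2, rmn_unit3,
    PySem.Str.isIn]
  by_cases h1 : PySem.Chars.isIn ['t','e','x','t','_','m','o','d','e','l','1'] p.1.toList = true
  · simp [h1]
  · by_cases h2 : PySem.Chars.isIn ['t','e','x','t','_','m','o','d','e','l','2'] p.1.toList = true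
    · simp [h1, h2]
    · by_cases h3 : PySem.Chars.isIn ['t','e','x','t','_','m','o','d','e','l','3'] p.1.toList = true
      · simp [h1, h2, h3]
      · simp [h1, h2, h3]

-- ===== VERDICT (by name: the statement is the Claim_ definition above) =====
theorem replace_model_names_spec : Claim_equal_replace_model_names := by
  intro models _
  show _ = _
  rw [rmn_B_eval]
  simpa [replace_model_names] using rmn_A_step [] models
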